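-- pv_equiv track=rewrite | github.com/Kapizany/IA_PONG | IAPong_AlgGen.py | gerarBase
-- ===== SOURCE A (Python) =====
-- def gerarBase(windowWidth,max_pos_ball,min_pos_ball):
--     'a base determina as posicoes de maximo e minimo da bola ocm base no tamanho da janela '
--     distance = max_pos_ball - min_pos_ball
--     base = [[], []]
--
--     for j in range(0,windowWidth+1,3):
--         for i in range (0,distance +1,5):
--             base[0].append(j) # posiçao da raquete
--             base[1].append(i + min_pos_ball) #posição da bolinha
--     return base
-- ===== SOURCE B (Python) =====
-- def gerarBase(windowWidth, max_pos_ball, min_pos_ball):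
--     # count the points on each axis, then generate both columns from a single
--     # flat index k in range(nj*nb) by divmod: no nested loops, pure index arithmetic
--     nj = windowWidth // 3 + 1 if windowWidth >= 0 else 0
--     nb = (max_pos_ball - min_pos_ball) // 5 + 1 if max_pos_ball >= min_pos_ball else 0
--     ks = range(nj * nb)
--     return [[3 * (k // nb) for k in ks], [min_pos_ball + 5 * (k % nb) for k in ks]]
-- ===== Notes on version B (the rewrite author's own statement) =====
-- stated objective: alternative
-- what changed: Replaces the nested append loop over two ranges with closed-form index arithmetic: count the points on each axis, then compute both columns directly from a single flat index k via k // nb and k % nb.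
import Mathlib
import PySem

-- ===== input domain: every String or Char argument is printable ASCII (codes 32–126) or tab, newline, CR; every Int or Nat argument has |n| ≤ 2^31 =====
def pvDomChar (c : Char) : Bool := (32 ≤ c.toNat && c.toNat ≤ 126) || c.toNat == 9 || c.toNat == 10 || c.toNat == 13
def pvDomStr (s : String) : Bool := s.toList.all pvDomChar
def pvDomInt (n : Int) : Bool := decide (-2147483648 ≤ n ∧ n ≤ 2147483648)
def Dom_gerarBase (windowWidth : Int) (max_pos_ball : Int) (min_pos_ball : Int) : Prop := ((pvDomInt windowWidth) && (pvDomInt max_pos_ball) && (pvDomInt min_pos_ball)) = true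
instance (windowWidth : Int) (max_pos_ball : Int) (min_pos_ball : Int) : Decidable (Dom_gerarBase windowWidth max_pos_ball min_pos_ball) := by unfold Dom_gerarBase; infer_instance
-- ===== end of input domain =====

-- B computes both columns by closed-form index arithmetic (k // nb, k % nb over one flat range) instead of A's nested append loops; same return value.

-- ===== PORT A =====
def gerarBase (windowWidth : Int) (max_pos_ball : Int) (min_pos_ball : Int) : List (List Int) :=
  let distance := max_pos_ball - min_pos_ball
  let base : List Int × List Int :=
    (PySem.List.pyRange 0 (windowWidth + 1) 3).foldl (fun acc j =>
      (PySem.List.pyRange 0 (distance + 1) 5).foldl (fun acc i =>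
        (acc.1 ++ [j], acc.2 ++ [i + min_pos_ball])) acc) ([], [])
  [base.1, base.2]

-- ===== PORT B =====
def gerarBase_alt (windowWidth : Int) (max_pos_ball : Int) (min_pos_ball : Int) : List (List Int) :=
  let nj : Int := if windowWidth ≥ 0 then PySem.Int.floordiv windowWidth 3 + 1 else 0
  let nb : Int := if max_pos_ball ≥ min_pos_ball then PySem.Int.floordiv (max_pos_ball - min_pos_ball) 5 + 1 else 0
  let ks := PySem.List.pyRange 0 (nj * nb) 1
  [ks.map (fun k => 3 * PySem.Int.floordiv k nb),
   ks.map (fun k => min_pos_ball + 5 * PySem.Int.mod k nb)]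

-- ===== PRECONDITION & SPEC =====
def Spec_gerarBase (windowWidth : Int) (max_pos_ball : Int) (min_pos_ball : Int) (out : List (List Int)) : Prop := out = gerarBase_alt windowWidth max_pos_ball min_pos_ball
instance (windowWidth : Int) (max_pos_ball : Int) (min_pos_ball : Int) (out : List (List Int)) : Decidable (Spec_gerarBase windowWidth max_pos_ball min_pos_ball out) := by unfold Spec_gerarBase; infer_instance

-- ===== CLAIM (what is proved, stated in full; the proofs are below) =====
def Claim_equal_gerarBase : Prop := ∀ (windowWidth : Int) (max_pos_ball : Int) (min_pos_ball : Int), Dom_gerarBase windowWidth max_pos_ball min_pos_ball → Spec_gerarBase windowWidth max_pos_ball min_pos_ball (gerarBase windowWidth max_pos_ball min_pos_ball)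

-- ===== LEMMAS AND PROOFS =====

-- inner loop of A: appends one copy of j and one shifted ball per inner-range element
theorem pv_inner (R : List Int) (m j : Int) (acc : List Int × List Int) :
    R.foldl (fun acc i => (acc.1 ++ [j], acc.2 ++ [i + m])) acc
      = (acc.1 ++ R.map (fun _ => j), acc.2 ++ R.map (fun i => i + m)) := by
  induction R generalizing acc with
  | nil => simp
  | cons r rs ih => simp [List.foldl, ih]

-- outer loop of A: accumulates the flattened cross product
theorem pv_outer (js R : List Int) (m : Int) (acc : List Int × List Int) :
    js.foldl (fun acc j => R.foldl (fun acc i => (acc.1 ++ [j], acc.2 ++ [i + m])) acc) acc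
      = (acc.1 ++ js.flatMap (fun j => R.map (fun _ => j)),
         acc.2 ++ js.flatMap (fun _ => R.map (fun i => i + m))) := by
  induction js generalizing acc with
  | nil => simp
  | cons j js ih =>
      rw [List.foldl_cons, pv_inner, ih]
      simp

-- cross product of two index ranges = one flat range read through divmod
theorem pv_cross {α : Type} (NJ NB : Nat) (F : Nat → Nat → α) :
    (List.range NJ).flatMap (fun t => (List.range NB).map (fun u => F t u))
      = (List.range (NJ * NB)).map (fun k => F (k / NB) (k % NB)) := by
  induction NJ with
  | zero => simp
  | succ n ih =>
      rw [List.range_succ, List.flatMap_append, ih,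
          show (n + 1) * NB = n * NB + NB by ring, List.range_add, List.map_append]
      simp only [List.flatMap_cons, List.flatMap_nil, List.append_nil, List.map_map]
      congr 1
      apply List.map_congr_left
      intro u hu
      have hu' : u < NB := List.mem_range.mp hu
      have hq : (n * NB + u) / NB = n := by
        rw [Nat.add_comm, Nat.add_mul_div_right _ _ (by omega : 0 < NB),
            Nat.div_eq_of_lt hu']
        omega
      have hr : (n * NB + u) % NB = u := by
        rw [Nat.add_comm, Nat.add_mul_mod_self_right, Nat.mod_eq_of_lt hu']
      simp [hq, hr]

-- ===== VERDICT (by name: the statement is the Claim_ definition above) =====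
theorem gerarBase_spec : Claim_equal_gerarBase := by
  intro w M m _
  unfold Spec_gerarBase gerarBase gerarBase_alt
  dsimp only
  rw [pv_outer]
  by_cases hw : 0 ≤ w
  · by_cases hMm : m ≤ M
    · -- both axes non-empty
      have h3 : (0:Int) < 3 := by norm_num
      have h5 : (0:Int) < 5 := by norm_num
      rw [PySem.List.pyRange_of_pos _ _ h3, PySem.List.pyRange_of_pos _ _ h5,
          PySem.List.pyRange_one]
      set NJ := (if (0:Int) < w + 1 then ((w + 1 - 0 + 3 - 1) / 3).toNat else 0) with hNJ
      set NB := (if (0:Int) < M - m + 1 then ((M - m + 1 - 0 + 5 - 1) / 5).toNat else 0) with hNB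
      have hnj : (if w ≥ 0 then PySem.Int.floordiv w 3 + 1 else 0) = (NJ : Int) := by
        rw [hNJ, if_pos hw, if_pos (by omega), PySem.Int.floordiv_eq_ediv_of_pos h3]
        omega
      have hnb : (if M ≥ m then PySem.Int.floordiv (M - m) 5 + 1 else 0) = (NB : Int) := by
        rw [hNB, if_pos hMm, if_pos (by omega), PySem.Int.floordiv_eq_ediv_of_pos h5]
        omega
      simp only [hnj, hnb]
      have htot : ((NJ : Int) * NB - 0).toNat = NJ * NB := by
        omega
      rw [List.flatMap_map, List.flatMap_map, htot]
      have hNBpos : 0 < NB := by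
        rw [hNB, if_pos (by omega)]; omega
      simp only [List.map_map, Function.comp_def]
      rw [pv_cross NJ NB (fun t _ => (0:Int) + 3 * (t : Int)),
          pv_cross NJ NB (fun _ u => (0:Int) + 5 * (u : Int) + m)]
      simp only [List.cons.injEq, and_true]
      refine ⟨?_, ?_⟩ <;>
      · apply List.map_congr_left
        intro k hk
        have hk0 : ((0:Int) + (k:Int)) = ((k:Nat):Int) := by push_cast; ring
        simp only [hk0, PySem.Int.floordiv_natCast, PySem.Int.mod_natCast]
        push_cast
        ring
    · -- ball axis empty
      have hb : PySem.List.pyRange 0 (M - m + 1) 5 = [] := by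
        rw [PySem.List.pyRange_of_pos _ _ (by norm_num : (0:Int) < 5)]
        simp [show ¬(0:Int) < M - m + 1 by omega]
      simp [hb, if_neg (by omega : ¬ M ≥ m)]
  · -- racket axis empty
    have hj : PySem.List.pyRange 0 (w + 1) 3 = [] := by
      rw [PySem.List.pyRange_of_pos _ _ (by norm_num : (0:Int) < 3)]
      simp [show ¬(0:Int) < w + 1 by omega]
    simp [hj, if_neg (by omega : ¬ w ≥ 0)]
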